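-- pv_equiv track=rewrite | github.com/Mao-beta/AtCoder | AOJ/DPL_4_B.py | split_and_list
-- ===== SOURCE A (Python) =====
-- from itertools import accumulate, combinations, permutations
--
-- def split_and_list(A):
--     """
--     半分全列挙して前半と後半の部分和を返す
--     O(2^(N//2))
--     """
--     N = len(A)
--     former, latter = A[:N // 2], A[N // 2:]
--     fn, ln = len(former), len(latter)
--     F = []
--     for k in range(fn + 1):
--         F += [sum(c) for c in combinations(former, k)]
--     L = []
--     for k in range(ln + 1):
--         L += [sum(c) for c in combinations(latter, k)]
--     return F, L
-- ===== SOURCE B (Python) =====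
-- def split_and_list(A):
--     """Pascal-style DP over elements: buckets[k] holds size-k subset sums in
--     combinations order; each sum costs O(1) instead of re-summing each tuple."""
--     n = len(A)
--
--     def step(x, g):
--         res = [[0]]
--         prev = g[0]
--         for b in g[1:]:
--             res.append([x + s for s in prev] + b)
--             prev = b
--         res.append([x + s for s in prev])
--         return res
--
--     def sums(lst):
--         g = [[0]]
--         for x in reversed(lst):
--             g = step(x, g)
--         return [s for b in g for s in b]
--
--     return sums(A[:n // 2]), sums(A[n // 2:])
-- ===== Notes on version B (the rewrite author's own statement) =====
-- stated objective: alternative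
-- what changed: replaces the per-k itertools.combinations enumeration (each subset re-summed from scratch) by a single Pascal-style DP over the elements that extends size-(k-1) bucket sums by one addition each, preserving the k-grouped lexicographic order; fewer additions per sum, but runtime is dominated by the 2^(n/2)-sized output
import Mathlib
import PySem

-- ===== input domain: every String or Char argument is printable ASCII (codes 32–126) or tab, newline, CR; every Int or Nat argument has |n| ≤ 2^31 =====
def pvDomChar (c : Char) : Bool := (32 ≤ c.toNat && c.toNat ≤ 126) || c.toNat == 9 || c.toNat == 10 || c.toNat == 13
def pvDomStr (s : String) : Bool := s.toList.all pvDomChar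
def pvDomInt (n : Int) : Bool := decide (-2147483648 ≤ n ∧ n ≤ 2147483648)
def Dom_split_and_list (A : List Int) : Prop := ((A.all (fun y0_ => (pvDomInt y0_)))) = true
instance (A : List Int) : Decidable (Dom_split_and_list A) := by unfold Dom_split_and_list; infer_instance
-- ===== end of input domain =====

-- B replaces the per-k combinations enumeration by a Pascal-style DP over the elements
-- that builds each subset sum by extending a smaller bucket's sum with one addition.

-- ===== PORT A =====
-- itertools.combinations(l, k) in Python's lexicographic order (library call, ported by hand; exact)
def pyCombinations (l : List Int) (k : Nat) : List (List Int) :=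
  match k, l with
  | 0, _ => [[]]
  | _ + 1, [] => []
  | k + 1, x :: xs => (pyCombinations xs k).map (x :: ·) ++ pyCombinations xs (k + 1)

def split_and_list (A : List Int) : List Int × List Int :=
  let N := A.length
  let former := A.take (N / 2)   -- A[:N//2], exact for 0 ≤ N//2
  let latter := A.drop (N / 2)   -- A[N//2:]
  let fn := former.length
  let ln := latter.length
  let F := (List.range (fn + 1)).foldl
    (fun acc k => acc ++ (pyCombinations former k).map (fun c => c.sum)) []
  let L := (List.range (ln + 1)).foldl
    (fun acc k => acc ++ (pyCombinations latter k).map (fun c => c.sum)) []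
  (F, L)

-- ===== PORT B =====
-- step: the inner 'for b in g[1:]' loop with accumulator prev
def stepAux (x : Int) (prev : List Int) : List (List Int) → List (List Int)
  | [] => [prev.map (fun s => x + s)]
  | b :: bs => (prev.map (fun s => x + s) ++ b) :: stepAux x b bs

def step (x : Int) (g : List (List Int)) : List (List Int) :=
  match g with
  | [] => [[0]]          -- unreachable: g is always nonempty (g starts as [[0]])
  | g0 :: rest => [0] :: stepAux x g0 rest

def sumsB (lst : List Int) : List Int :=
  ((lst.reverse).foldl (fun g x => step x g) [[0]]).flatten

def split_and_list_alt (A : List Int) : List Int × List Int :=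
  let n := A.length
  (sumsB (A.take (n / 2)), sumsB (A.drop (n / 2)))

-- ===== PRECONDITION & SPEC =====
def Spec_split_and_list (A : List Int) (out : List Int × List Int) : Prop := out = split_and_list_alt A
instance (A : List Int) (out : List Int × List Int) : Decidable (Spec_split_and_list A out) := by unfold Spec_split_and_list; infer_instance

-- ===== CLAIM (what is proved, stated in full; the proofs are below) =====
def Claim_equal_split_and_list : Prop := ∀ (A : List Int), Dom_split_and_list A → Spec_split_and_list A (split_and_list A)

-- ===== LEMMAS AND PROOFS =====

-- size-k subset sums, in A's order
def combSums (l : List Int) (k : Nat) : List Int := (pyCombinations l k).map (fun c => c.sum)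

theorem pyCombinations_eq_nil (l : List Int) (k : Nat) (h : l.length < k) :
    pyCombinations l k = [] := by
  induction l generalizing k with
  | nil => cases k with
    | zero => omega
    | succ k => rfl
  | cons x xs ih =>
    cases k with
    | zero => omega
    | succ k =>
      simp [pyCombinations]
      constructor
      · exact ih k (by simpa using Nat.lt_of_succ_lt_succ h)
      · exact ih (k + 1) (by simp at h ⊢; omega)

theorem combSums_succ (x : Int) (xs : List Int) (k : Nat) :
    combSums (x :: xs) (k + 1) = (combSums xs k).map (fun s => x + s) ++ combSums xs (k + 1) := by
  simp [combSums, pyCombinations, List.map_map, Function.comp]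

theorem stepAux_range (x : Int) :
    ∀ (n : Nat) (h : Nat → List Int), h (n + 1) = [] →
    stepAux x (h 0) ((List.range n).map (fun k => h (k + 1)))
      = (List.range (n + 1)).map (fun k => (h k).map (fun s => x + s) ++ h (k + 1)) := by
  intro n
  induction n with
  | zero => intro h hend; simp [stepAux, hend]
  | succ n ih =>
    intro h hend
    rw [List.range_succ_eq_map, List.range_succ_eq_map]
    simp only [List.map_cons, List.map_map]
    show stepAux x (h 0) (h 1 :: _) = _
    rw [stepAux]
    congr 1
    have := ih (fun k => h (k + 1)) (by simpa using hend)
    simpa [Function.comp] using this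

theorem buckets_eq (l : List Int) :
    l.foldr step [[0]] = (List.range (l.length + 1)).map (fun k => combSums l k) := by
  induction l with
  | nil => simp [combSums, pyCombinations]
  | cons x xs ih =>
    show step x (xs.foldr step [[0]]) = _
    rw [ih]
    have h0 : combSums xs 0 = [0] := by simp [combSums, pyCombinations]
    have h0' : combSums (x :: xs) 0 = [0] := by simp [combSums, pyCombinations]
    rw [List.range_succ_eq_map, List.map_cons, h0, step]
    rw [show List.length (x :: xs) + 1 = (xs.length + 1) + 1 by simp]
    rw [List.range_succ_eq_map, List.map_cons, h0']
    congr 1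
    rw [List.map_map, List.map_map]
    have hr := stepAux_range x xs.length (fun k => combSums xs k)
      (by simp [combSums, pyCombinations_eq_nil xs (xs.length + 1) (by omega)])
    simp only [] at hr
    rw [h0] at hr
    rw [show (List.range xs.length).map ((fun k => combSums xs k) ∘ Nat.succ)
          = (List.range xs.length).map (fun k => combSums xs (k + 1)) from rfl]
    rw [hr]
    apply List.map_congr_left
    intro k _
    simp [Function.comp, combSums_succ]

theorem sumsB_eq (l : List Int) :
    sumsB l = (List.range (l.length + 1)).foldl
      (fun acc k => acc ++ (pyCombinations l k).map (fun c => c.sum)) [] := by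
  unfold sumsB
  rw [List.foldl_reverse]
  have : l.foldr (fun x g => step x g) [[0]] = l.foldr step [[0]] := rfl
  rw [this, buckets_eq]
  rw [show ∀ (r : List Nat) (f : Nat → List Int),
        r.foldl (fun acc k => acc ++ f k) [] = (r.map f).flatten from ?_]
  · rfl
  · intro r f
    induction r using List.reverseRecOn with
    | nil => simp
    | append_singleton r a ih => simp [ih]

-- ===== VERDICT (by name: the statement is the Claim_ definition above) =====
theorem split_and_list_spec : Claim_equal_split_and_list := by
  intro A _
  show split_and_list A = split_and_list_alt A
  unfold split_and_list split_and_list_alt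
  simp only [sumsB_eq]
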